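-- pv_equiv track=rewrite | github.com/pjhartout/stoei | stoei/slurm/gpu_parser.py | aggregate_gpu_counts
-- ===== SOURCE A (Python) =====
-- def has_specific_gpu_types(gpu_entries: list[tuple[str, int]]) -> bool:
--     """Check if GPU entries contain specific (non-generic) GPU types.
--
--     When both generic (gres/gpu=8) and specific (gres/gpu:h200=8) entries
--     exist, they represent the same GPUs. This helper identifies if we have
--     specific types to avoid double-counting.
--
--     Args:
--         gpu_entries: List of (gpu_type, gpu_count) tuples.
--
--     Returns:
--         True if any entry has a specific GPU type (not "gpu").
--     """
--     return any(gpu_type.lower() != "gpu" for gpu_type, _ in gpu_entries)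
--
-- def aggregate_gpu_counts(
--     gpu_entries: list[tuple[str, int]],
--     skip_generic_if_specific: bool = True,
-- ) -> dict[str, int]:
--     """Aggregate GPU entries into a dictionary of type -> count.
--
--     Handles the case where both generic and specific GPU entries exist
--     to avoid double-counting.
--
--     Args:
--         gpu_entries: List of (gpu_type, gpu_count) tuples.
--         skip_generic_if_specific: If True and specific types exist,
--             skip generic "gpu" entries to avoid double-counting.
--
--     Returns:
--         Dictionary mapping GPU type (uppercase) to total count.
--     """
--     has_specific = has_specific_gpu_types(gpu_entries)
--     result: dict[str, int] = {}
--
--     for gpu_type, gpu_count in gpu_entries: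
--         # Skip generic if we have specific types (to avoid double-counting)
--         if skip_generic_if_specific and has_specific and gpu_type.lower() == "gpu":
--             continue
--
--         gpu_type_upper = gpu_type.upper()
--         result[gpu_type_upper] = result.get(gpu_type_upper, 0) + gpu_count
--
--     return result
-- ===== SOURCE B (Python) =====
-- def aggregate_gpu_counts(
--     gpu_entries: list[tuple[str, int]],
--     skip_generic_if_specific: bool = True,
-- ) -> dict[str, int]:
--     """Aggregate-then-prune: sum every entry unconditionally, then drop the
--     generic "GPU" bucket when specific types are present."""
--     result: dict[str, int] = {}
--     for gpu_type, gpu_count in gpu_entries: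
--         key = gpu_type.upper()
--         result[key] = result.get(key, 0) + gpu_count
--     if skip_generic_if_specific and any(key != "GPU" for key in result):
--         result.pop("GPU", None)
--     return result
-- ===== Notes on version B (the rewrite author's own statement) =====
-- stated objective: simpler
-- what changed: Replaces A's separate has_specific pre-pass plus a per-iteration skip branch with a single unconditional accumulation loop followed by one post-loop prune that pops the generic 'GPU' key when any specific key exists.
import Mathlib
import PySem

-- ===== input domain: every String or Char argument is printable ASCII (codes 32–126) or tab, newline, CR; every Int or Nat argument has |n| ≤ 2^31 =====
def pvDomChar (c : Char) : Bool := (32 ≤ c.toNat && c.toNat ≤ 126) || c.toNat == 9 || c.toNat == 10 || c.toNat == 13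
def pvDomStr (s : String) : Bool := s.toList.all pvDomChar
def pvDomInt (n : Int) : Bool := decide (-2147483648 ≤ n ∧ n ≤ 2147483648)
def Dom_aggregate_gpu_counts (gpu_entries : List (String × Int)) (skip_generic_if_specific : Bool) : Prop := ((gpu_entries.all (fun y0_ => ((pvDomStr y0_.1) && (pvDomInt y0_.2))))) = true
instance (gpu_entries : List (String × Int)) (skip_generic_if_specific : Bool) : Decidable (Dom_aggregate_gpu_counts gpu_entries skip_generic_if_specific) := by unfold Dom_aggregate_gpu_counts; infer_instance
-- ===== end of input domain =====

-- B replaces A's has_specific pre-pass + per-iteration skip branch by one unconditional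
-- accumulation loop followed by a single post-loop prune of the generic "GPU" key (objective: simpler).

-- ===== PORT A =====
def has_specific_gpu_types (gpu_entries : List (String × Int)) : Bool :=
  gpu_entries.any (fun p => PySem.Str.lower p.1 != "gpu")

def aggregate_gpu_counts (gpu_entries : List (String × Int)) (skip_generic_if_specific : Bool) : List (String × Int) :=
  let has_specific := has_specific_gpu_types gpu_entries
  (gpu_entries.foldl
    (fun (d : PySem.Dict String Int) p =>
      if skip_generic_if_specific && has_specific && (PySem.Str.lower p.1 == "gpu") then d
      else d.insert (PySem.Str.upper p.1) (d.getD (PySem.Str.upper p.1) 0 + p.2))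
    PySem.Dict.empty).items

-- ===== PORT B =====
def aggregate_gpu_counts_alt (gpu_entries : List (String × Int)) (skip_generic_if_specific : Bool) : List (String × Int) :=
  let result := gpu_entries.foldl
    (fun (d : PySem.Dict String Int) p =>
      d.insert (PySem.Str.upper p.1) (d.getD (PySem.Str.upper p.1) 0 + p.2))
    PySem.Dict.empty
  (if skip_generic_if_specific && result.keys.any (fun k => k != "GPU") then result.erase "GPU"
   else result).items

-- ===== PRECONDITION & SPEC =====
def Spec_aggregate_gpu_counts (gpu_entries : List (String × Int)) (skip_generic_if_specific : Bool) (out : List (String × Int)) : Prop := out = aggregate_gpu_counts_alt gpu_entries skip_generic_if_specific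
instance (gpu_entries : List (String × Int)) (skip_generic_if_specific : Bool) (out : List (String × Int)) : Decidable (Spec_aggregate_gpu_counts gpu_entries skip_generic_if_specific out) := by unfold Spec_aggregate_gpu_counts; infer_instance

-- ===== CLAIM (what is proved, stated in full; the proofs are below) =====
def Claim_equal_aggregate_gpu_counts : Prop := ∀ (gpu_entries : List (String × Int)) (skip_generic_if_specific : Bool), Dom_aggregate_gpu_counts gpu_entries skip_generic_if_specific → Spec_aggregate_gpu_counts gpu_entries skip_generic_if_specific (aggregate_gpu_counts gpu_entries skip_generic_if_specific)

-- ===== LEMMAS AND PROOFS =====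

theorem charToNatInj (a b : Char) (h : a.toNat = b.toNat) : a = b := by
  apply Char.ext; apply UInt32.toBitVec_inj.mp; exact BitVec.toNat_injective h
theorem lowerChar_iff_upperChar (c l u : Char)
    (hl : 97 ≤ l.toNat ∧ l.toNat ≤ 122) (hu : u.toNat + 32 = l.toNat) :
    (PySem.Chars.lowerChar c = l) ↔ (PySem.Chars.upperChar c = u) := by
  have htn : ∀ (n : Nat), n.isValidChar → (Char.ofNat n).toNat = n := by
    intro n h; simp [Char.ofNat, h, Char.ofNatAux, Char.toNat]
  have hiff : ∀ (a b : Char), a = b ↔ a.toNat = b.toNat :=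
    fun a b => ⟨fun h => h ▸ rfl, charToNatInj a b⟩
  have hup : ∀ x : Char, PySem.Chars.isupper x = true ↔ 65 ≤ x.toNat ∧ x.toNat ≤ 90 := by
    intro x
    rw [PySem.Chars.isupper, Bool.and_eq_true, decide_eq_true_iff, decide_eq_true_iff,
      Char.le_def, Char.le_def, UInt32.le_iff_toNat_le, UInt32.le_iff_toNat_le]
    exact Iff.rfl
  have hlo : ∀ x : Char, PySem.Chars.islower x = true ↔ 97 ≤ x.toNat ∧ x.toNat ≤ 122 := by
    intro x
    rw [PySem.Chars.islower, Bool.and_eq_true, decide_eq_true_iff, decide_eq_true_iff,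
      Char.le_def, Char.le_def, UInt32.le_iff_toNat_le, UInt32.le_iff_toNat_le]
    exact Iff.rfl
  rw [PySem.Chars.lowerChar, PySem.Chars.upperChar]
  by_cases h1 : PySem.Chars.isupper c = true
  · have hb := (hup c).mp h1
    have h2 : PySem.Chars.islower c = true → False := by
      intro h; have := (hlo c).mp h; omega
    have hv : (c.toNat + 32).isValidChar := Or.inl (by omega)
    simp only [h1, if_true, eq_false h2, if_false, hiff, htn _ hv]
    omega
  · by_cases h2 : PySem.Chars.islower c = true
    · have hb := (hlo c).mp h2
      have hv : (c.toNat - 32).isValidChar := Or.inl (by omega)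
      rw [if_neg h1, if_pos h2]
      simp only [hiff, htn _ hv]
      omega
    · have hb1 : ¬ (65 ≤ c.toNat ∧ c.toNat ≤ 90) := fun h => h1 ((hup c).mpr h)
      have hb2 : ¬ (97 ≤ c.toNat ∧ c.toNat ≤ 122) := fun h => h2 ((hlo c).mpr h)
      rw [if_neg h1, if_neg h2]
      simp only [hiff]
      omega

theorem chars_gpu_iff (cs : List Char) :
    (PySem.Chars.lower cs = ['g','p','u']) ↔ (PySem.Chars.upper cs = ['G','P','U']) := by
  match cs with
  | [] => simp [PySem.Chars.lower, PySem.Chars.upper]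
  | [a] => simp [PySem.Chars.lower, PySem.Chars.upper]
  | [a,b] => simp [PySem.Chars.lower, PySem.Chars.upper]
  | [a,b,c] =>
    simp only [PySem.Chars.lower, PySem.Chars.upper, List.map_cons, List.map_nil,
      List.cons.injEq, and_true,
      lowerChar_iff_upperChar a 'g' 'G' (by decide) (by decide),
      lowerChar_iff_upperChar b 'p' 'P' (by decide) (by decide),
      lowerChar_iff_upperChar c 'u' 'U' (by decide) (by decide)]
  | a::b::c::d::rest => simp [PySem.Chars.lower, PySem.Chars.upper]

theorem lower_gpu_iff_upper_GPU (t : String) :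
    (PySem.Str.lower t = "gpu") ↔ (PySem.Str.upper t = "GPU") := by
  rw [← String.toList_inj, ← String.toList_inj, PySem.Str.toList_lower, PySem.Str.toList_upper]
  exact chars_gpu_iff t.toList

theorem pvFilterMapSelf {κ ν : Type} [BEq κ] [LawfulBEq κ] (k : κ) (v : ν) (items : List (κ × ν)) :
    List.filter (fun p => !(p.1 == k)) (items.map (fun p => if (p.1 == k) = true then (k, v) else p))
    = items.filter (fun p => !(p.1 == k)) := by
  induction items with
  | nil => rfl
  | cons q rest ih =>
    by_cases hq : (q.1 == k) = true <;> simp [hq, ih]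

theorem pvFilterMapNe {κ ν : Type} [BEq κ] [LawfulBEq κ] (k k' : κ) (v : ν) (h : k' ≠ k)
    (items : List (κ × ν)) :
    List.filter (fun p => !(p.1 == k)) (items.map (fun p => if (p.1 == k') = true then (k', v) else p))
    = (items.filter (fun p => !(p.1 == k))).map (fun p => if (p.1 == k') = true then (k', v) else p) := by
  induction items with
  | nil => rfl
  | cons q rest ih =>
    by_cases hq : (q.1 == k') = true
    · have hqk : (q.1 == k) = false := by
        rw [beq_iff_eq] at hq; rw [beq_eq_false_iff_ne, hq]; exact h
      simp [hq, hqk, h, ih]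
    · by_cases hqk : (q.1 == k) = true <;> simp [hq, hqk, ih]

theorem pvFindFilter {κ ν : Type} [BEq κ] [LawfulBEq κ] (k k' : κ) (h : k' ≠ k)
    (items : List (κ × ν)) :
    List.find? (fun p => p.1 == k') (items.filter (fun p => !(p.1 == k)))
    = List.find? (fun p => p.1 == k') items := by
  induction items with
  | nil => rfl
  | cons q rest ih =>
    by_cases hq : (q.1 == k) = true
    · have hq' : (q.1 == k') = false := by
        rw [beq_iff_eq] at hq; rw [beq_eq_false_iff_ne, hq]; exact fun hc => h hc.symm
      rw [List.filter_cons_of_neg (by simp [hq])]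
      simp only [List.find?_cons, hq', ih]
    · cases hq' : (q.1 == k') <;>
        · rw [List.filter_cons_of_pos (by simp [hq])]
          simp only [List.find?_cons, hq', ih]

theorem pvAnyFilter {κ ν : Type} [BEq κ] [LawfulBEq κ] (k k' : κ) (h : k' ≠ k)
    (items : List (κ × ν)) :
    (items.filter (fun p => !(p.1 == k))).any (fun p => p.1 == k')
    = items.any (fun p => p.1 == k') := by
  induction items with
  | nil => rfl
  | cons q rest ih =>
    by_cases hq : (q.1 == k) = true
    · have hq' : (q.1 == k') = false := by
        rw [beq_iff_eq] at hq; rw [beq_eq_false_iff_ne, hq]; exact fun hc => h hc.symm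
      simp [hq, hq', ih]
    · simp [hq, ih]

theorem getD_erase_of_ne {κ ν : Type} [BEq κ] [LawfulBEq κ] (d : PySem.Dict κ ν) (k k' : κ) (v0 : ν)
    (h : k' ≠ k) : (d.erase k).getD k' v0 = d.getD k' v0 := by
  obtain ⟨items⟩ := d
  simp only [PySem.Dict.erase, PySem.Dict.getD, PySem.Dict.get?]
  rw [pvFindFilter k k' h items]

theorem erase_insert_self {κ ν : Type} [BEq κ] [LawfulBEq κ] (d : PySem.Dict κ ν) (k : κ) (v : ν) :
    (d.insert k v).erase k = d.erase k := by
  obtain ⟨items⟩ := d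
  apply PySem.Dict.ext
  simp only [PySem.Dict.insert, PySem.Dict.erase]
  split
  · exact pvFilterMapSelf k v items
  · simp [List.filter_append]

theorem erase_insert_of_ne {κ ν : Type} [BEq κ] [LawfulBEq κ] (d : PySem.Dict κ ν) (k k' : κ) (v : ν)
    (h : k' ≠ k) : (d.insert k' v).erase k = (d.erase k).insert k' v := by
  obtain ⟨items⟩ := d
  apply PySem.Dict.ext
  simp only [PySem.Dict.insert, PySem.Dict.erase, PySem.Dict.contains_mk]
  rw [show (List.filter (fun p => !(p.1 == k)) items).any (fun p => p.1 == k')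
      = items.any (fun p => p.1 == k') from pvAnyFilter k k' h items]
  by_cases hc : items.any (fun p => p.1 == k') = true
  · rw [if_pos hc, if_pos hc]
    exact pvFilterMapNe k k' v h items
  · rw [if_neg hc, if_neg hc]
    have hkv : (((k', v) : κ × ν).1 == k) = false := beq_eq_false_iff_ne.mpr h
    simp [List.filter_append, hkv]

-- erasing "GPU" after the full accumulation = accumulating while skipping generic entries
theorem erase_fold (L : List (String × Int)) (d : PySem.Dict String Int) :
    (L.foldl (fun d p => d.insert (PySem.Str.upper p.1) (d.getD (PySem.Str.upper p.1) 0 + p.2)) d).erase "GPU"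
    = L.foldl (fun d p => if PySem.Str.lower p.1 == "gpu" then d
        else d.insert (PySem.Str.upper p.1) (d.getD (PySem.Str.upper p.1) 0 + p.2)) (d.erase "GPU") := by
  induction L generalizing d with
  | nil => rfl
  | cons p L ih =>
    simp only [List.foldl_cons, ih]
    by_cases h : PySem.Str.lower p.1 = "gpu"
    · have hk : PySem.Str.upper p.1 = "GPU" := (lower_gpu_iff_upper_GPU p.1).mp h
      rw [hk, erase_insert_self]
      simp [h]
    · have hk : PySem.Str.upper p.1 ≠ "GPU" := fun hc => h ((lower_gpu_iff_upper_GPU p.1).mpr hc)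
      rw [erase_insert_of_ne _ _ _ _ hk, getD_erase_of_ne _ _ _ _ hk]
      simp [h]

-- keys appearing in the accumulated dict are exactly the uppercased entry types
theorem mem_keys_fold (L : List (String × Int)) (k : String) :
    k ∈ (L.foldl (fun (d : PySem.Dict String Int) p =>
          d.insert (PySem.Str.upper p.1) (d.getD (PySem.Str.upper p.1) 0 + p.2)) PySem.Dict.empty).keys
    ↔ ∃ p ∈ L, k = PySem.Str.upper p.1 := by
  rw [PySem.Dict.keys_foldl_insert_key]
  simp [PySem.Set.mem_update, PySem.Dict.keys_empty, eq_comm]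

-- ===== VERDICT (by name: the statement is the Claim_ definition above) =====
theorem aggregate_gpu_counts_spec : Claim_equal_aggregate_gpu_counts := by
  intro L skip _
  unfold Spec_aggregate_gpu_counts aggregate_gpu_counts aggregate_gpu_counts_alt has_specific_gpu_types
  cases skip with
  | false => simp
  | true =>
    by_cases hs : (L.any (fun p => PySem.Str.lower p.1 != "gpu")) = true
    · -- specific types exist: A skips generic entries; B prunes "GPU" afterwards
      have hany : ((L.foldl (fun (d : PySem.Dict String Int) p =>
            d.insert (PySem.Str.upper p.1) (d.getD (PySem.Str.upper p.1) 0 + p.2)) PySem.Dict.empty).keys.any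
            (fun k => k != "GPU")) = true := by
        rw [List.any_eq_true] at hs ⊢
        obtain ⟨p, hp, hne⟩ := hs
        refine ⟨PySem.Str.upper p.1, (mem_keys_fold L _).mpr ⟨p, hp, rfl⟩, ?_⟩
        simp only [bne_iff_ne, ne_eq] at hne ⊢
        exact fun hc => hne ((lower_gpu_iff_upper_GPU p.1).mpr hc)
      simp only [hs, hany, Bool.and_true, Bool.true_and, if_true]
      have := erase_fold L PySem.Dict.empty
      simp only [show (PySem.Dict.empty : PySem.Dict String Int).erase "GPU" = PySem.Dict.empty from rfl] at this
      rw [← this]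
    · -- all entries are generic: neither side skips or prunes anything
      have hall : ∀ p ∈ L, PySem.Str.lower p.1 = "gpu" := by
        intro p hp
        by_contra hne
        exact hs (List.any_eq_true.mpr ⟨p, hp, bne_iff_ne.mpr hne⟩)
      have hany : ((L.foldl (fun (d : PySem.Dict String Int) p =>
            d.insert (PySem.Str.upper p.1) (d.getD (PySem.Str.upper p.1) 0 + p.2)) PySem.Dict.empty).keys.any
            (fun k => k != "GPU")) = false := by
        rw [List.any_eq_false]
        intro k hk
        obtain ⟨p, hp, rfl⟩ := (mem_keys_fold L _).mp hk
        simp [(lower_gpu_iff_upper_GPU p.1).mp (hall p hp)]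
      simp [hs, hany]
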